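-- pv_equiv track=rewrite | github.com/lunnar-being/personal_web_version1 | aiospider/module/callback.py | abs_list
-- ===== SOURCE A (Python) =====
-- def abs_list(alist):
--     blist = []
--     k = ''
--     for i in alist:
--         if i.startswith('\n'):
--             k = k + i
--         elif (i.startswith('\n') == False) and (i.endswith('\n') == False):
--             k = k + i
--         elif i.endswith('\n'):
--             k = k + i
--             blist.append(k)
--             k = ''
--     return blist
-- ===== SOURCE B (Python) =====
-- def _first_flush(items):
--     idx = 0
--     for s in items:
--         if not s.startswith('\n') and s.endswith('\n'):
--             return idx
--         idx += 1
--     return None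
--
--
-- def abs_list(alist):
--     # Recursive decomposition: find the first chunk boundary (an item that
--     # does not start with '\n' but ends with '\n'), emit the joined prefix,
--     # recurse on the remainder; a tail with no boundary is discarded.
--     j = _first_flush(alist)
--     if j is None:
--         return []
--     return [''.join(alist[:j + 1])] + abs_list(alist[j + 1:])
-- ===== Notes on version B (the rewrite author's own statement) =====
-- stated objective: alternative
-- what changed: Replaces A's single-pass fold with a running string accumulator and interleaved flushes by a recursive find-first-boundary / split / join decomposition: locate the first item that does not start with a newline but ends with one, emit the joined prefix slice, and recurse on the remaining suffix.
import Mathlib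
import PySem

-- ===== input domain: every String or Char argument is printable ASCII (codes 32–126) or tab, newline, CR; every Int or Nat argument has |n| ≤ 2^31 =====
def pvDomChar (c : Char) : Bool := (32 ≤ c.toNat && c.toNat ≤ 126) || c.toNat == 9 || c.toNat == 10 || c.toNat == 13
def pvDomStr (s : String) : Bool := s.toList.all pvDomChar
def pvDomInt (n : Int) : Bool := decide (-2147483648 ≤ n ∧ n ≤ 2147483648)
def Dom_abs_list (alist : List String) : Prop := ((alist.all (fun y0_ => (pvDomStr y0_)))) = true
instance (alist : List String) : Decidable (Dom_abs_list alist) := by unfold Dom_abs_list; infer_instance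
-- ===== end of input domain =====

-- B replaces A's single-pass accumulator/flush loop by a recursive
-- find-first-boundary / split / join decomposition (alternative, same cost).


-- ===== PORT A =====
-- the loop body of A; the running string k is kept as its list of chars
-- (string concatenation k + i is list append, flushing builds the String)
def absStep (st : List String × List Char) (i : String) : List String × List Char :=
  if PySem.Str.startswith i "\n" then
    (st.1, st.2 ++ i.toList)
  else if (PySem.Str.startswith i "\n" == false) && (PySem.Str.endswith i "\n" == false) then
    (st.1, st.2 ++ i.toList)
  else if PySem.Str.endswith i "\n" then
    (st.1 ++ [String.ofList (st.2 ++ i.toList)], [])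
  else st

def abs_list (alist : List String) : List String :=
  (alist.foldl absStep ([], [])).1

-- ===== PORT B =====
-- port of _first_flush: scan with a running index, return the first index
-- whose item does not start with '\n' but ends with '\n'
def firstFlushAux : List String → Nat → Option Nat
  | [], _ => none
  | s :: t, idx =>
    if !PySem.Str.startswith s "\n" && PySem.Str.endswith s "\n" then some idx
    else firstFlushAux t (idx + 1)

theorem firstFlushAux_lt (l : List String) : ∀ (n j : Nat),
    firstFlushAux l n = some j → n ≤ j ∧ j - n < l.length := by
  induction l with
  | nil => intro n j h; simp [firstFlushAux] at h
  | cons s t ih =>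
    intro n j h
    simp only [firstFlushAux] at h
    split at h
    · cases h; simp
    · have := ih (n + 1) j h; simp; omega

def abs_list_alt (alist : List String) : List String :=
  match h : firstFlushAux alist 0 with
  | none => []
  | some j =>
    PySem.Str.join "" (PySem.List.slice alist none (some ((j : Int) + 1)))
      :: abs_list_alt (PySem.List.slice alist (some ((j : Int) + 1)) none)
termination_by alist.length
decreasing_by
  have hj := firstFlushAux_lt alist 0 j h
  have hc : ((j : Int) + 1) = (((j + 1 : Nat) : Int)) := by push_cast; ring
  rw [hc, PySem.List.slice_from_natCast]
  simp; omega

-- ===== PRECONDITION & SPEC =====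
def Spec_abs_list (alist : List String) (out : List String) : Prop := out = abs_list_alt alist
instance (alist : List String) (out : List String) : Decidable (Spec_abs_list alist out) := by unfold Spec_abs_list; infer_instance

-- ===== CLAIM (what is proved, stated in full; the proofs are below) =====
def Claim_equal_abs_list : Prop := ∀ (alist : List String), Dom_abs_list alist → Spec_abs_list alist (abs_list alist)

-- ===== LEMMAS AND PROOFS =====

-- the boundary test both programs branch on
def pvFlush (i : String) : Bool :=
  !PySem.Str.startswith i "\n" && PySem.Str.endswith i "\n"

-- reference recursion: chunks of l with pending prefix k
def pvChunks : List Char → List String → List String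
  | _, [] => []
  | k, i :: t =>
    if pvFlush i then String.ofList (k ++ i.toList) :: pvChunks [] t
    else pvChunks (k ++ i.toList) t

theorem absStep_eq (st : List String × List Char) (i : String) :
    absStep st i =
      if pvFlush i then (st.1 ++ [String.ofList (st.2 ++ i.toList)], ([] : List Char))
      else (st.1, st.2 ++ i.toList) := by
  unfold absStep pvFlush
  cases hs : PySem.Str.startswith i "\n" <;> cases he : PySem.Str.endswith i "\n" <;> simp

theorem foldA_eq (l : List String) : ∀ (b : List String) (k : List Char),
    (l.foldl absStep (b, k)).1 = b ++ pvChunks k l := by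
  induction l with
  | nil => intro b k; simp [pvChunks]
  | cons i t ih =>
    intro b k
    simp only [List.foldl_cons, absStep_eq, pvChunks]
    by_cases h : pvFlush i = true
    · simp [h, ih]
    · simp only [Bool.not_eq_true] at h
      simp [h, ih]

theorem firstFlushAux_succ (t : List String) : ∀ (n : Nat),
    firstFlushAux t (n + 1) = (firstFlushAux t n).map (· + 1) := by
  induction t with
  | nil => intro n; simp [firstFlushAux]
  | cons s r ih =>
    intro n
    simp only [firstFlushAux]
    split
    · simp
    · exact ih (n + 1)

theorem firstFlushAux_cons (i : String) (t : List String) (n : Nat) :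
    firstFlushAux (i :: t) n =
      if pvFlush i then some n else (firstFlushAux t n).map (· + 1) := by
  simp only [firstFlushAux, pvFlush]
  split
  · rfl
  · rw [firstFlushAux_succ]

theorem join_nil_cons (a : List Char) (l : List (List Char)) :
    PySem.Chars.join [] (a :: l) = a ++ PySem.Chars.join [] l := by
  cases l <;> simp [PySem.Chars.join, List.intercalate, List.intersperse]

theorem strJoin_empty_cons (a : String) (l : List String) :
    PySem.Str.join "" (a :: l) = String.ofList (a.toList ++ (PySem.Str.join "" l).toList) := by
  apply String.toList_injective
  simp [PySem.Str.join, join_nil_cons]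

theorem alt_eq_none (l : List String) (h : firstFlushAux l 0 = none) :
    abs_list_alt l = [] := by
  rw [abs_list_alt]
  split
  · rfl
  · rename_i j heq; rw [heq] at h; cases h

theorem alt_eq_some (l : List String) (j : Nat) (h : firstFlushAux l 0 = some j) :
    abs_list_alt l =
      PySem.Str.join "" (PySem.List.slice l none (some ((j : Int) + 1)))
        :: abs_list_alt (PySem.List.slice l (some ((j : Int) + 1)) none) := by
  rw [abs_list_alt]
  split
  · rename_i heq; rw [heq] at h; cases h
  · rename_i j' heq; rw [heq] at h; injection h with h2; subst h2; rfl

theorem chunks_eq_alt (l : List String) : ∀ (k : List Char),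
    pvChunks k l =
      match abs_list_alt l with
      | [] => []
      | c :: cs => String.ofList (k ++ c.toList) :: cs := by
  induction l with
  | nil =>
    intro k
    rw [alt_eq_none [] rfl]
    simp [pvChunks]
  | cons i t ih =>
    intro k
    simp only [pvChunks]
    by_cases h : pvFlush i = true
    · -- boundary at index 0: alt (i :: t) = i :: abs_list_alt t
      have h0 : firstFlushAux (i :: t) 0 = some 0 := by
        rw [firstFlushAux_cons, if_pos h]
      have hs1 : PySem.List.slice (i :: t) none (some (((0 : Nat) : Int) + 1)) = [i] := by
        have hcast : (((0 : Nat) : Int) + 1) = ((1 : Nat) : Int) := by norm_num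
        rw [hcast, PySem.List.slice_to_natCast]; rfl
      have hs2 : PySem.List.slice (i :: t) (some (((0 : Nat) : Int) + 1)) none = t := by
        have hcast : (((0 : Nat) : Int) + 1) = ((1 : Nat) : Int) := by norm_num
        rw [hcast, PySem.List.slice_from_natCast]; rfl
      have hj : PySem.Str.join "" [i] = String.ofList i.toList := by
        apply String.toList_injective
        simp [PySem.Str.join, PySem.Chars.join, List.intercalate]
      rw [alt_eq_some _ _ h0, hs1, hs2, hj, ih []]
      cases habs : abs_list_alt t <;> simp [h]
    · -- no boundary at index 0
      simp only [Bool.not_eq_true] at h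
      have h0 : firstFlushAux (i :: t) 0 = (firstFlushAux t 0).map (· + 1) := by
        rw [firstFlushAux_cons, if_neg (by simp [h])]
      cases hf : firstFlushAux t 0 with
      | none =>
        have h0' : firstFlushAux (i :: t) 0 = none := by rw [h0, hf]; rfl
        rw [alt_eq_none _ h0', ih (k ++ i.toList), alt_eq_none _ hf]
        simp [h]
      | some j =>
        have h0' : firstFlushAux (i :: t) 0 = some (j + 1) := by rw [h0, hf]; rfl
        have hc2 : (((j + 1 : Nat) : Int) + 1) = (((j + 2 : Nat) : Int)) := by push_cast; ring
        have hs1 : PySem.List.slice (i :: t) none (some (((j + 1 : Nat) : Int) + 1))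
            = i :: t.take (j + 1) := by
          rw [hc2, PySem.List.slice_to_natCast]; rfl
        have hs2 : PySem.List.slice (i :: t) (some (((j + 1 : Nat) : Int) + 1)) none
            = t.drop (j + 1) := by
          rw [hc2, PySem.List.slice_from_natCast]; rfl
        have hc1 : ((j : Int) + 1) = (((j + 1 : Nat) : Int)) := by push_cast; ring
        have hs1' : PySem.List.slice t none (some ((j : Int) + 1)) = t.take (j + 1) := by
          rw [hc1, PySem.List.slice_to_natCast]
        have hs2' : PySem.List.slice t (some ((j : Int) + 1)) none = t.drop (j + 1) := by
          rw [hc1, PySem.List.slice_from_natCast]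
        rw [alt_eq_some _ _ h0', hs1, hs2, ih (k ++ i.toList), alt_eq_some _ _ hf, hs1', hs2',
          strJoin_empty_cons]
        simp [h, List.append_assoc]

-- ===== VERDICT (by name: the statement is the Claim_ definition above) =====
theorem abs_list_spec : Claim_equal_abs_list := by
  intro alist _
  unfold Spec_abs_list abs_list
  rw [foldA_eq, List.nil_append, chunks_eq_alt]
  cases h : abs_list_alt alist with
  | nil => rfl
  | cons c cs => simp
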